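-- pv_equiv track=rewrite | github.com/MoonF1re/BSUIR-1-Sem | AOIS/Lab 3/main.py | combine_terms
-- ===== SOURCE A (Python) =====
-- def combine_terms(term1, term2):
--     combined = []
--     diff_count = 0
--     for bit1, bit2 in zip(term1, term2):
--         if bit1 == bit2:
--             combined.append(bit1)
--         else:
--             combined.append('-')
--             diff_count += 1
--     return combined if diff_count == 1 else None
-- ===== SOURCE B (Python) =====
-- def combine_terms(term1, term2):
--     n = min(len(term1), len(term2))
--     i = 0
--     while i < n and term1[i] == term2[i]:
--         i += 1
--     if i == n:
--         return None
--     if term1[i + 1:n] != term2[i + 1:n]: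
--         return None
--     return list(term1[:i]) + ['-'] + list(term1[i + 1:n])
-- ===== Notes on version B (the rewrite author's own statement) =====
-- stated objective: alternative
-- what changed: Replaces A's full-scan fold that builds the merged term while counting all mismatches with an early-exiting index loop that locates the first differing position, a single slice comparison of the remaining tails (stopping the work at a second mismatch), and a splice of term1[:i] + ['-'] + term1[i+1:n].
import Mathlib
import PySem

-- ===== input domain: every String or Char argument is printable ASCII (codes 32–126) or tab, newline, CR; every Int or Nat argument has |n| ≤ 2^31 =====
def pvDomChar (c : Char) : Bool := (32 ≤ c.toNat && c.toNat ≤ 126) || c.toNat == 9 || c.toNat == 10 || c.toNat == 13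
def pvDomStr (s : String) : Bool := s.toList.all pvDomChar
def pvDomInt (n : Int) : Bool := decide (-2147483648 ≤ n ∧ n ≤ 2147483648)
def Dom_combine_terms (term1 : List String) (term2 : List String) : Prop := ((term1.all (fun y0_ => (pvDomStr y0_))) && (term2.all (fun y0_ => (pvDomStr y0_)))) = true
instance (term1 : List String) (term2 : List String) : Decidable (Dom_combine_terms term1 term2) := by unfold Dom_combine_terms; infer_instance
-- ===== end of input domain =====

-- B replaces A's full-scan build-and-count fold by an early-exiting index loop that finds the
-- first differing position, a slice comparison of the remainders, and a splice of term1's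
-- slices around '-' (objective: alternative algorithm, can stop early on a second mismatch).

-- ===== PORT A =====
def combine_terms (term1 : List String) (term2 : List String) : Option (List String) :=
  let st := (List.zip term1 term2).foldl
    (fun (acc : List String × Int) p =>
      if p.1 = p.2 then (acc.1 ++ [p.1], acc.2)
      else (acc.1 ++ ["-"], acc.2 + 1))
    ([], 0)
  if st.2 = 1 then some st.1 else none

-- ===== PORT B =====
-- the `while i < n and term1[i] == term2[i]: i += 1` loop of Source B
def pvLoop (term1 term2 : List String) (n i : Nat) : Nat :=
  if h : i < n ∧ PySem.List.pyGet? term1 (i : Int) = PySem.List.pyGet? term2 (i : Int) then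
    pvLoop term1 term2 n (i + 1)
  else i
termination_by n - i
decreasing_by omega

def combine_terms_alt (term1 : List String) (term2 : List String) : Option (List String) :=
  let n := min term1.length term2.length
  let i := pvLoop term1 term2 n 0
  if i = n then none
  else if PySem.List.slice term1 (some ((i : Int) + 1)) (some (n : Int)) ≠
          PySem.List.slice term2 (some ((i : Int) + 1)) (some (n : Int)) then none
  else some (PySem.List.slice term1 none (some (i : Int)) ++ ["-"] ++
             PySem.List.slice term1 (some ((i : Int) + 1)) (some (n : Int)))

-- ===== PRECONDITION & SPEC =====
def Spec_combine_terms (term1 : List String) (term2 : List String) (out : Option (List String)) : Prop := out = combine_terms_alt term1 term2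
instance (term1 : List String) (term2 : List String) (out : Option (List String)) : Decidable (Spec_combine_terms term1 term2 out) := by unfold Spec_combine_terms; infer_instance

-- ===== CLAIM (what is proved, stated in full; the proofs are below) =====
def Claim_equal_combine_terms : Prop := ∀ (term1 : List String) (term2 : List String), Dom_combine_terms term1 term2 → Spec_combine_terms term1 term2 (combine_terms term1 term2)

-- ===== LEMMAS AND PROOFS =====

/-- The merged bit at one position. -/
def pvG (p : String × String) : String := if p.1 = p.2 then p.1 else "-"

/-- Number of differing positions. -/
def pvCnt (zs : List (String × String)) : Nat := (zs.filter (fun p => p.1 != p.2)).length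

/-- Length of the equal prefix (index of the first mismatch). -/
def pvCp (zs : List (String × String)) : Nat := (zs.takeWhile (fun p => p.1 == p.2)).length

theorem pvFoldA (zs : List (String × String)) (l : List String) (c : Int) :
    zs.foldl (fun (acc : List String × Int) p =>
      if p.1 = p.2 then (acc.1 ++ [p.1], acc.2)
      else (acc.1 ++ ["-"], acc.2 + 1)) (l, c)
      = (l ++ zs.map pvG, c + (pvCnt zs : Int)) := by
  induction zs generalizing l c with
  | nil => simp [pvCnt]
  | cons p zs ih =>
    by_cases h : p.1 = p.2 <;>
      simp [pvCnt, pvG, h, ih]; ring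

theorem pvZipDrop (a b : List String) (k : Nat) :
    (List.zip a b).drop k = List.zip (a.drop k) (b.drop k) := by
  induction a generalizing b k with
  | nil => simp
  | cons x xs ih =>
    cases b with
    | nil => simp
    | cons y ys =>
      cases k with
      | zero => simp
      | succ m => simpa using ih ys m

theorem pvZipTake (a b : List String) (k : Nat) :
    (List.zip a b).take k = List.zip (a.take k) (b.take k) := by
  induction a generalizing b k with
  | nil => simp
  | cons x xs ih =>
    cases b with
    | nil => simp
    | cons y ys =>
      cases k with
      | zero => simp
      | succ m => simpa using ih ys m

theorem pvMapFst (a b : List String) :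
    (List.zip a b).map Prod.fst = a.take b.length := by
  induction a generalizing b with
  | nil => simp
  | cons x xs ih =>
    cases b with
    | nil => simp
    | cons y ys => simpa using ih ys

theorem pvMapSnd (a b : List String) :
    (List.zip a b).map Prod.snd = b.take a.length := by
  induction a generalizing b with
  | nil => simp
  | cons x xs ih =>
    cases b with
    | nil => simp
    | cons y ys => simpa using ih ys

theorem pvCpLe (zs : List (String × String)) : pvCp zs ≤ zs.length := by
  induction zs with
  | nil => simp [pvCp]
  | cons p zs ih =>
    by_cases h : p.1 == p.2 <;> simp [pvCp, h] at ih ⊢ <;> omega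

theorem pvCpLen (zs : List (String × String)) (h : pvCp zs = zs.length) : pvCnt zs = 0 := by
  induction zs with
  | nil => simp [pvCnt]
  | cons p zs ih =>
    by_cases hp : p.1 = p.2
    · have h' : pvCp zs = zs.length := by simpa [pvCp, hp] using h
      simpa [pvCnt, hp] using ih h'
    · simp [pvCp, hp] at h

theorem pvCntZeroIff (zs : List (String × String)) :
    pvCnt zs = 0 ↔ zs.map Prod.fst = zs.map Prod.snd := by
  induction zs with
  | nil => simp [pvCnt]
  | cons p zs ih =>
    by_cases hp : p.1 = p.2
    · simp [pvCnt, hp]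
    · simp [pvCnt, hp]

theorem pvCntZeroG (zs : List (String × String)) (h : pvCnt zs = 0) :
    zs.map pvG = zs.map Prod.fst := by
  induction zs with
  | nil => simp
  | cons p zs ih =>
    by_cases hp : p.1 = p.2
    · have h' : pvCnt zs = 0 := by simpa [pvCnt, hp] using h
      simp [pvG, hp, ih h']
    · simp [pvCnt, hp] at h

theorem pvSplit (zs : List (String × String)) (h : pvCp zs < zs.length) :
    pvCnt zs = pvCnt (zs.drop (pvCp zs + 1)) + 1 ∧
    zs.map pvG = (zs.take (pvCp zs)).map Prod.fst ++ "-" :: (zs.drop (pvCp zs + 1)).map pvG := by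
  induction zs with
  | nil => simp [pvCp] at h
  | cons p zs ih =>
    by_cases hp : p.1 = p.2
    · have hcp : pvCp (p :: zs) = pvCp zs + 1 := by simp [pvCp, hp]
      have h' : pvCp zs < zs.length := by rw [hcp] at h; simpa using h
      obtain ⟨ih1, ih2⟩ := ih h'
      constructor
      · simpa [pvCnt, hcp, hp] using ih1
      · rw [hcp]
        simp only [List.map_cons, List.take_succ_cons, List.drop_succ_cons]
        rw [ih2]
        simp [pvG, hp]
    · have hcp : pvCp (p :: zs) = 0 := by simp [pvCp, hp]
      constructor
      · simp [pvCnt, hcp, hp]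
      · simp [hcp, pvG, hp]

theorem pvLoopEq (t1 t2 : List String) :
    ∀ (k i : Nat), min t1.length t2.length - i ≤ k →
      pvLoop t1 t2 (min t1.length t2.length) i = i + pvCp ((List.zip t1 t2).drop i) := by
  intro k
  induction k with
  | zero =>
    intro i h
    have hge : min t1.length t2.length ≤ i := by omega
    rw [pvLoop]
    have hd : (List.zip t1 t2).drop i = [] :=
      List.drop_eq_nil_of_le (by simp [List.length_zip]; omega)
    rw [dif_neg (fun hc => absurd hc.1 (by omega))]
    simp [hd, pvCp]
  | succ k ih =>
    intro i h
    rw [pvLoop]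
    by_cases hc : i < min t1.length t2.length ∧
        PySem.List.pyGet? t1 (i : Int) = PySem.List.pyGet? t2 (i : Int)
    · obtain ⟨hlt, heq⟩ := hc
      have h1 : i < t1.length := by omega
      have h2 : i < t2.length := by omega
      have hval : t1[i] = t2[i] := by
        simpa [PySem.List.pyGet?_natCast, List.getElem?_eq_getElem, h1, h2] using heq
      have hiz : i < (List.zip t1 t2).length := by simp [List.length_zip]; omega
      have hd : (List.zip t1 t2).drop i = (t1[i], t2[i]) :: (List.zip t1 t2).drop (i + 1) := by
        rw [List.drop_eq_getElem_cons hiz, List.getElem_zip]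
      have := ih (i + 1) (by omega)
      rw [dif_pos ⟨hlt, heq⟩, this, hd]
      simp [pvCp, hval]
      omega
    · rw [dif_neg hc]
      rcases Nat.lt_or_ge i (min t1.length t2.length) with hlt | hge
      · have h1 : i < t1.length := by omega
        have h2 : i < t2.length := by omega
        have hne : t1[i] ≠ t2[i] := by
          intro hv
          exact hc ⟨hlt, by simp [h1, h2, hv]⟩
        have hiz : i < (List.zip t1 t2).length := by simp [List.length_zip]; omega
        have hd : (List.zip t1 t2).drop i = (t1[i], t2[i]) :: (List.zip t1 t2).drop (i + 1) := by
          rw [List.drop_eq_getElem_cons hiz, List.getElem_zip]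
        simp [hd, pvCp, hne]
      · have hd : (List.zip t1 t2).drop i = [] :=
          List.drop_eq_nil_of_le (by simp [List.length_zip]; omega)
        simp [hd, pvCp]

-- the slice term1[i+1:n] is the first components of the zipped tail past position i
theorem pvSliceDrop (t1 t2 : List String) (k : Nat) :
    PySem.List.slice t1 (some ((k : Int))) (some ((min t1.length t2.length : Nat) : Int)) =
      ((List.zip t1 t2).drop k).map Prod.fst := by
  rw [PySem.List.slice_natCast, pvZipDrop, pvMapFst]
  apply List.take_eq_take_iff.mpr
  simp [List.length_drop]
  omega

theorem pvSliceDropSnd (t1 t2 : List String) (k : Nat) :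
    PySem.List.slice t2 (some ((k : Int))) (some ((min t1.length t2.length : Nat) : Int)) =
      ((List.zip t1 t2).drop k).map Prod.snd := by
  rw [PySem.List.slice_natCast, pvZipDrop, pvMapSnd]
  apply List.take_eq_take_iff.mpr
  simp [List.length_drop]
  omega

theorem pvSliceTake (t1 t2 : List String) (k : Nat) (hk : k ≤ t2.length) :
    PySem.List.slice t1 none (some (k : Int)) = ((List.zip t1 t2).take k).map Prod.fst := by
  rw [PySem.List.slice_to_natCast, pvZipTake, pvMapFst, List.take_take]
  apply List.take_eq_take_iff.mpr
  simp
  omega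

-- ===== VERDICT (by name: the statement is the Claim_ definition above) =====
theorem combine_terms_spec : Claim_equal_combine_terms := by
  intro t1 t2 _
  unfold Spec_combine_terms combine_terms combine_terms_alt
  rw [pvFoldA]
  have hloop : pvLoop t1 t2 (min t1.length t2.length) 0
      = pvCp (List.zip t1 t2) := by
    simpa using pvLoopEq t1 t2 (min t1.length t2.length) 0 (by omega)
  set zs := List.zip t1 t2 with hzs
  set n := min t1.length t2.length with hn
  have hnz : zs.length = n := by simp [hzs, hn, List.length_zip]
  set i0 := pvCp zs with hi0
  have hle : i0 ≤ n := by rw [← hnz]; exact pvCpLe zs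
  simp only [hloop, List.nil_append, zero_add]
  by_cases h1 : i0 = n
  · have hc0 : pvCnt zs = 0 := pvCpLen zs (by omega)
    simp [h1, hc0]
  · rw [if_neg h1]
    have hlt : i0 < zs.length := by omega
    obtain ⟨hcnt, hmap⟩ := pvSplit zs hlt
    rw [← hi0] at hcnt hmap
    have hcast : ((i0 : Int) + 1) = (((i0 + 1 : Nat)) : Int) := by push_cast; ring
    have hs1 : PySem.List.slice t1 (some ((i0 : Int) + 1)) (some (n : Int))
        = (zs.drop (i0 + 1)).map Prod.fst := by rw [hcast]; exact pvSliceDrop t1 t2 (i0 + 1)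
    have hs2 : PySem.List.slice t2 (some ((i0 : Int) + 1)) (some (n : Int))
        = (zs.drop (i0 + 1)).map Prod.snd := by rw [hcast]; exact pvSliceDropSnd t1 t2 (i0 + 1)
    have htk : PySem.List.slice t1 none (some (i0 : Int))
        = (zs.take i0).map Prod.fst := pvSliceTake t1 t2 i0 (by omega)
    by_cases h2 : pvCnt (zs.drop (i0 + 1)) = 0
    · have hsame : (zs.drop (i0 + 1)).map Prod.fst = (zs.drop (i0 + 1)).map Prod.snd :=
        (pvCntZeroIff _).mp h2
      have hG : (zs.drop (i0 + 1)).map pvG = (zs.drop (i0 + 1)).map Prod.fst := pvCntZeroG _ h2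
      have hc1 : pvCnt zs = 1 := by omega
      rw [if_neg (not_not_intro (by rw [hs1, hs2, hsame]))]
      rw [if_pos (by rw [hc1]; norm_num)]
      rw [htk, hs1, hmap, hG]
      simp
    · have hdiff : (zs.drop (i0 + 1)).map Prod.fst ≠ (zs.drop (i0 + 1)).map Prod.snd :=
        fun hv => h2 ((pvCntZeroIff _).mpr hv)
      have hcne : ¬ ((pvCnt zs : Int) = 1) := by
        intro hv
        have : pvCnt zs = 1 := by exact_mod_cast hv
        omega
      rw [if_neg hcne]
      rw [if_pos (show PySem.List.slice t1 (some ((i0 : Int) + 1)) (some (n : Int)) ≠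
            PySem.List.slice t2 (some ((i0 : Int) + 1)) (some (n : Int)) by
          rw [hs1, hs2]; exact hdiff)]
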